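-- pv_equiv track=rewrite | github.com/Gray-Stone/bank-csv-interactive-cleaner | ff3_importer/mapping.py | _resolve_header_choice
-- ===== SOURCE A (Python) =====
-- def _resolve_header_choice(choice: str, headers: list[str]) -> str | None:
--     """Internal helper for resolve header choice."""
--     stripped = choice.strip()
--     if not stripped:
--         return None
--     if stripped.isdigit():
--         index = int(stripped)
--         if 0 <= index < len(headers):
--             return headers[index]
--         return None
--
--     exact = [header for header in headers if header == stripped]
--     if exact:
--         return exact[0]
--
--     lowered = stripped.lower()
--     ci = [header for header in headers if header.lower() == lowered]
--     if ci:
--         return ci[0]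
--     return None
-- ===== SOURCE B (Python) =====
-- def _resolve_header_choice(choice: str, headers: list[str]) -> str | None:
--     """Single pass: exact match returns immediately; first case-insensitive
--     candidate is remembered and used only if no exact match exists."""
--     stripped = choice.strip()
--     if not stripped:
--         return None
--     if stripped.isdigit():
--         index = int(stripped)
--         if 0 <= index < len(headers):
--             return headers[index]
--         return None
--     lowered = stripped.lower()
--     ci_match = None
--     for header in headers:
--         if header == stripped:
--             return header
--         if ci_match is None and header.lower() == lowered:
--             ci_match = header
--     return ci_match
-- ===== Notes on version B (the rewrite author's own statement) =====
-- stated objective: simpler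
-- what changed: Replaces the two list comprehensions (one full scan for exact matches, a second full scan for case-insensitive ones) by a single loop that returns on the first exact match and remembers only the first case-insensitive candidate.
import Mathlib
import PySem

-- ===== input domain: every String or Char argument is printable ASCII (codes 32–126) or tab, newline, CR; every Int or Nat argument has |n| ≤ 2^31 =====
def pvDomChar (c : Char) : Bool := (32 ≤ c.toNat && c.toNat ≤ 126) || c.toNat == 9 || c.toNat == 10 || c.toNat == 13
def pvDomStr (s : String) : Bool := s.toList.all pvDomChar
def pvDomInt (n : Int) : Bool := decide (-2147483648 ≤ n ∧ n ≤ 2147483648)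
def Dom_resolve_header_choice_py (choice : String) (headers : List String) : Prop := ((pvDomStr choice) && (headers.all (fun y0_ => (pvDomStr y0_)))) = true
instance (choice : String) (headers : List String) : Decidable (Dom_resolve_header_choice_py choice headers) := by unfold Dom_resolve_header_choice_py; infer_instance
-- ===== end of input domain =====

-- ===== PORT A =====
-- B changes only the matching strategy (one loop instead of two comprehensions); proved equal on Dom.
def resolve_header_choice_py (choice : String) (headers : List String) : Option String :=
  let stripped := PySem.Str.strip choice
  if stripped = "" then none
  else if PySem.Str.strIsdigit stripped then
    -- int(stripped): isdigit guarantees ofStr? = some, so getD 0 is exact here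
    let index := (PySem.Int.ofStr? stripped).getD 0
    if 0 ≤ index ∧ index < (headers.length : Int) then PySem.List.pyGet? headers index
    else none
  else
    let exact := headers.filter (fun header => header == stripped)
    match exact with
    | h :: _ => some h
    | [] =>
      let lowered := PySem.Str.lower stripped
      let ci := headers.filter (fun header => PySem.Str.lower header == lowered)
      match ci with
      | h :: _ => some h
      | [] => none

-- ===== PORT B =====
-- the single loop of Source B: return on exact match, remember the first case-insensitive candidate
def altLoop (stripped lowered : String) : List String → Option String → Option String
  | [], ci_match => ci_match
  | header :: rest, ci_match =>
    if header == stripped then some header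
    else altLoop stripped lowered rest
      (if ci_match.isNone && (PySem.Str.lower header == lowered) then some header else ci_match)

def resolve_header_choice_py_alt (choice : String) (headers : List String) : Option String :=
  let stripped := PySem.Str.strip choice
  if stripped = "" then none
  else if PySem.Str.strIsdigit stripped then
    -- int(stripped): isdigit guarantees ofStr? = some, so getD 0 is exact here
    let index := (PySem.Int.ofStr? stripped).getD 0
    if 0 ≤ index ∧ index < (headers.length : Int) then PySem.List.pyGet? headers index
    else none
  else
    altLoop stripped (PySem.Str.lower stripped) headers none

-- ===== PRECONDITION & SPEC =====
def Spec_resolve_header_choice_py (choice : String) (headers : List String) (out : Option String) : Prop := out = resolve_header_choice_py_alt choice headers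
instance (choice : String) (headers : List String) (out : Option String) : Decidable (Spec_resolve_header_choice_py choice headers out) := by unfold Spec_resolve_header_choice_py; infer_instance

-- ===== CLAIM (what is proved, stated in full; the proofs are below) =====
def Claim_equal_resolve_header_choice_py : Prop := ∀ (choice : String) (headers : List String), Dom_resolve_header_choice_py choice headers → Spec_resolve_header_choice_py choice headers (resolve_header_choice_py choice headers)

-- ===== LEMMAS AND PROOFS =====
-- the loop computes: first exact match, else the saved candidate, else the first ci match
theorem altLoop_spec (s l : String) (hs : List String) (ci : Option String) :
    altLoop s l hs ci =
      match hs.filter (fun h => h == s) with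
      | h :: _ => some h
      | [] =>
        match ci with
        | some c => some c
        | none =>
          match hs.filter (fun h => PySem.Str.lower h == l) with
          | h :: _ => some h
          | [] => none := by
  induction hs generalizing ci with
  | nil => cases ci <;> simp [altLoop]
  | cons h t ih =>
    by_cases he : h == s
    · simp [altLoop, he]
    · simp only [altLoop, he, List.filter_cons]
      rw [ih]
      by_cases hl : PySem.Str.lower h == l
      · cases ci <;> simp [hl, Option.isNone]
      · cases ci <;> simp [hl, Option.isNone]

-- ===== VERDICT (by name: the statement is the Claim_ definition above) =====
theorem resolve_header_choice_py_spec : Claim_equal_resolve_header_choice_py := by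
  intro choice headers _
  unfold Spec_resolve_header_choice_py resolve_header_choice_py resolve_header_choice_py_alt
  by_cases h1 : PySem.Str.strip choice = ""
  · simp [h1]
  · by_cases h2 : PySem.Chars.strIsdigit (PySem.Chars.strip choice.toList) = true
    · simp [h1, h2]
    · simp [h1, h2, altLoop_spec]
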